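-- pv_equiv track=rewrite | github.com/eyereasoner/eye | brains/cases/peasant.py | power_counts
-- ===== SOURCE A (Python) =====
-- from typing import List, Tuple
--
-- def peasant_multiply(a: int, b: int) -> int:
--     """Ancient Egyptian (peasant) multiplication with sign handling."""
--     # Handle sign, work with non-negative a,b
--     sign = -1 if (a < 0) ^ (b < 0) else 1
--     a, b = abs(a), abs(b)
--     result = 0
--     while b > 0:
--         if b & 1:
--             result += a        # accumulate
--         a <<= 1               # double a
--         b >>= 1               # halve b
--     return sign * result
--
-- def power_counts(base: int, exponent: int) -> Tuple[int, int, int]: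
--     """
--     Run peasant_power(base, exponent) and return:
--       (value, multiply_calls, square_calls) — both counted as peasant_multiply uses.
--     """
--     if exponent < 0:
--         raise ValueError("Exponent must be non-negative")
--     result = 1
--     b = base
--     e = exponent
--     mults = squares = 0
--     while e > 0:
--         if e & 1:
--             result = peasant_multiply(result, b); mults += 1
--         b = peasant_multiply(b, b); squares += 1
--         e >>= 1
--     return result, mults, squares
-- ===== SOURCE B (Python) =====
-- def power_counts(base: int, exponent: int):
--     """
--     Closed form instead of the loop: the peasant-power loop performs one
--     multiply per set bit of exponent and one square per bit of exponent.
--     """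
--     if exponent < 0:
--         raise ValueError("Exponent must be non-negative")
--     return base ** exponent, bin(exponent).count("1"), exponent.bit_length()
-- ===== Notes on version B (the rewrite author's own statement) =====
-- stated objective: alternative
-- what changed: Replaces the square-and-multiply loop built on shift-and-add peasant multiplication with a closed form: built-in pow for the value, popcount of the exponent for the multiply count and bit_length for the square count.
import Mathlib
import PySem

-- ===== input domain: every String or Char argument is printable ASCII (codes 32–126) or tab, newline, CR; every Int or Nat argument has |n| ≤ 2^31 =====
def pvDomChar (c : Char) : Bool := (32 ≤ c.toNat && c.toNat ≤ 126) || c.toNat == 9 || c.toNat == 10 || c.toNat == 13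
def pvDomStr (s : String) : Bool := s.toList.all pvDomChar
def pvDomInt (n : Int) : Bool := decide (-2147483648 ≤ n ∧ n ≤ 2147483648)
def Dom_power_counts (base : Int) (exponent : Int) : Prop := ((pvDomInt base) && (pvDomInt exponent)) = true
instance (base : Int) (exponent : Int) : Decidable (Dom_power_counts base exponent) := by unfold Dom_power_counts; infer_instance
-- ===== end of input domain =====

-- B replaces the square-and-multiply loop over shift-add peasant multiplication by the
-- closed form (base**exponent, popcount(exponent), exponent.bit_length()).

-- ===== PORT A =====
-- the 'while b > 0' loop of peasant_multiply (a doubles, b halves; b kept as Nat after abs)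
def pmLoop (a result : Int) (b : Nat) : Int :=
  if b = 0 then result
  else pmLoop (a * 2) (if b % 2 = 1 then result + a else result) (b / 2)
decreasing_by exact Nat.div_lt_self (Nat.pos_of_ne_zero (by assumption)) (by norm_num)

def peasant_multiply (a : Int) (b : Int) : Int :=
  (if (a < 0) ≠ (b < 0) then (-1 : Int) else 1) * pmLoop (a.natAbs : Int) 0 b.natAbs

-- the 'while e > 0' loop of power_counts (e kept as Nat, exponent is non-negative under Pre_)
def pcLoop (result b : Int) (e : Nat) (mults squares : Int) : Int × Int × Int :=
  if e = 0 then (result, mults, squares)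
  else pcLoop (if e % 2 = 1 then peasant_multiply result b else result)
              (peasant_multiply b b) (e / 2)
              (if e % 2 = 1 then mults + 1 else mults) (squares + 1)
decreasing_by exact Nat.div_lt_self (Nat.pos_of_ne_zero (by assumption)) (by norm_num)

def power_counts (base : Int) (exponent : Int) : Int × Int × Int :=
  if exponent < 0 then (0, 0, 0)   -- Python raises ValueError here; excluded by Pre_power_counts
  else pcLoop 1 base exponent.toNat 0 0

-- ===== PORT B =====
-- Source B: base ** exponent, bin(exponent).count("1"), exponent.bit_length()
def power_counts_alt (base : Int) (exponent : Int) : Int × Int × Int :=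
  if exponent < 0 then (0, 0, 0)   -- Python raises ValueError here; excluded by Pre_power_counts
  else (base ^ exponent.toNat, (PySem.Int.bitCount exponent : Int), (PySem.Int.bitLength exponent : Int))

-- ===== PRECONDITION & SPEC =====
-- Pre_ excludes exponent < 0, where the Python A raises ValueError (returns no value).
def Pre_power_counts (base : Int) (exponent : Int) : Prop := 0 ≤ exponent
instance (base : Int) (exponent : Int) : Decidable (Pre_power_counts base exponent) := by
  unfold Pre_power_counts; infer_instance

def pvWitness_power_counts : Int × Int := (3, 13)

def Spec_power_counts (base : Int) (exponent : Int) (out : Int × Int × Int) : Prop := out = power_counts_alt base exponent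
instance (base : Int) (exponent : Int) (out : Int × Int × Int) : Decidable (Spec_power_counts base exponent out) := by unfold Spec_power_counts; infer_instance

-- ===== CLAIM (what is proved, stated in full; the proofs are below) =====
def Claim_equal_power_counts : Prop := ∀ (base : Int) (exponent : Int), Dom_power_counts base exponent → Pre_power_counts base exponent → Spec_power_counts base exponent (power_counts base exponent)

-- ===== LEMMAS AND PROOFS =====

lemma pmLoop_eq (b : Nat) : ∀ (a r : Int), pmLoop a r b = r + a * b := by
  induction b using Nat.strong_induction_on with
  | _ b ih =>
    intro a r
    rw [pmLoop]
    by_cases hb : b = 0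
    · simp [hb]
    · have hlt : b / 2 < b := Nat.div_lt_self (Nat.pos_of_ne_zero hb) (by norm_num)
      simp only [hb, if_false]
      rw [ih _ hlt]
      obtain ⟨c, hc⟩ : ∃ c, b / 2 = c := ⟨_, rfl⟩
      rw [hc]
      rcases Nat.mod_two_eq_zero_or_one b with h | h
      · rw [if_neg (by omega)]
        have hb' : b = 2 * c := by omega
        rw [hb']; push_cast; ring
      · rw [if_pos h]
        have hb' : b = 2 * c + 1 := by omega
        rw [hb']; push_cast; ring

lemma peasant_multiply_eq (a b : Int) : peasant_multiply a b = a * b := by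
  unfold peasant_multiply
  rw [pmLoop_eq, Int.natCast_natAbs, Int.natCast_natAbs]
  rcases lt_or_ge a 0 with ha | ha <;> rcases lt_or_ge b 0 with hb | hb
  · rw [if_neg (by simp [ha, hb]), abs_of_neg ha, abs_of_neg hb]; ring
  · rw [if_pos (by simp [ha, not_lt.mpr hb]), abs_of_neg ha, abs_of_nonneg hb]; ring
  · rw [if_pos (by simp [not_lt.mpr ha, hb]), abs_of_nonneg ha, abs_of_neg hb]; ring
  · rw [if_neg (by simp [not_lt.mpr ha, not_lt.mpr hb]), abs_of_nonneg ha, abs_of_nonneg hb]; ring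

lemma pcLoop_eq (e : Nat) : ∀ (r b m s : Int),
    pcLoop r b e m s =
      (r * b ^ e, m + (PySem.Int.bitCount (e : Int) : Int), s + (PySem.Int.bitLength (e : Int) : Int)) := by
  induction e using Nat.strong_induction_on with
  | _ e ih =>
    intro r b m s
    rw [pcLoop]
    by_cases he : e = 0
    · simp [he, PySem.Int.bitCount_zero, PySem.Int.bitLength_zero]
    · have hpos : 0 < e := Nat.pos_of_ne_zero he
      have hlt : e / 2 < e := Nat.div_lt_self hpos (by norm_num)
      simp only [he, if_false]
      rw [ih _ hlt]
      rw [PySem.Int.bitCount_natCast hpos, PySem.Int.bitLength_natCast hpos]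
      have hpow : b ^ e = (b * b) ^ (e / 2) * b ^ (e % 2) := by
        rw [← pow_two, ← pow_mul, ← pow_add]
        congr 1
        omega
      rcases Nat.mod_two_eq_zero_or_one e with h | h
      · rw [if_neg (by omega), if_neg (by omega)]
        refine Prod.ext ?_ (Prod.ext ?_ ?_)
        · simp [peasant_multiply_eq, hpow, h]
        · simp [h]
        · push_cast; ring
      · rw [if_pos h, if_pos h]
        refine Prod.ext ?_ (Prod.ext ?_ ?_)
        · simp [peasant_multiply_eq, hpow, h]; ring
        · simp [h]; push_cast; ring
        · push_cast; ring

-- ===== VERDICT (by name: the statement is the Claim_ definition above) =====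
theorem power_counts_spec : Claim_equal_power_counts := by
  intro base exponent _ hpre
  unfold Spec_power_counts power_counts power_counts_alt
  have hnl : ¬ exponent < 0 := not_lt.mpr hpre
  simp only [hnl, if_false]
  rw [pcLoop_eq]
  rw [Int.toNat_of_nonneg hpre]
  simp
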